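-- pv_equiv track=rewrite | github.com/tuandq-cs/coding-pratice | engineer-pro/dsa-super/12-backtracking-with-memorization/target-sum/naive-solution.py | calcSum
-- ===== SOURCE A (Python) =====
-- from typing import List
--
-- def calcSum(bitmask: int, nums: List[int]):
--     n = len(nums)
--     s = 0
--     for i in range(n):
--         sign = getSign(bitmask)
--         s += sign * nums[i]
--         bitmask = bitmask >> 1
--     return s
--
-- def getSign(bitmask: int) -> int:
--     return 1 if bitmask & 1 == 1 else -1
-- ===== SOURCE B (Python) =====
-- def calcSum(bitmask, nums):
--     total = sum(nums)
--     selected = sum(x for i, x in enumerate(nums) if (bitmask >> i) & 1 == 1)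
--     return 2 * selected - total
-- ===== Notes on version B (the rewrite author's own statement) =====
-- stated objective: simpler
-- what changed: Replaces the sequential sign-multiply loop with mutating bitmask shifts by two aggregate sums (total and the sum of elements whose bit is set) combined with the closed form 2*selected - total.
import Mathlib
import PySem

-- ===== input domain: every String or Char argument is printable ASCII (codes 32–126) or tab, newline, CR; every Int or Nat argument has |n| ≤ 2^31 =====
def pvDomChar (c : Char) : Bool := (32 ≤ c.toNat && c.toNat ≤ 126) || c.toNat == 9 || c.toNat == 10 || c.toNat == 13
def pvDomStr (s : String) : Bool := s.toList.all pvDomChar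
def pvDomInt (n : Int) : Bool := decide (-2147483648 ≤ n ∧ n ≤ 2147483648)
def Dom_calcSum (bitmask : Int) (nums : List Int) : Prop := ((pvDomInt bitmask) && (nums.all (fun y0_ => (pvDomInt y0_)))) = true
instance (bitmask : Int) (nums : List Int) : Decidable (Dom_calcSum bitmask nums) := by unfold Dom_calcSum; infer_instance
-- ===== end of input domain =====

-- B replaces A's sequential sign-multiply loop (mutating bitmask) by two aggregate
-- sums combined with the closed form 2*selected - total; same O(n) cost, simpler shape.

-- shift of an Int by a Nat amount (Python's '>>' on our inputs; fixes the HShiftRight instance)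
def shiftN (b : Int) (k : Nat) : Int := b >>> k

-- ===== PORT A =====
-- getSign(bitmask) = 1 if bitmask & 1 == 1 else -1
def getSign (bitmask : Int) : Int := if PySem.Int.band bitmask 1 = 1 then 1 else -1

-- the for-loop over range(n) indexes nums in order; ported as a fold over nums
-- carrying the state (s, bitmask), with bitmask >> 1 as Lean's '>>> 1' (exact).
def calcSum (bitmask : Int) (nums : List Int) : Int :=
  (nums.foldl (fun (st : Int × Int) x => (st.1 + getSign st.2 * x, shiftN st.2 1))
    (0, bitmask)).1

-- ===== PORT B =====
def calcSum_alt (bitmask : Int) (nums : List Int) : Int :=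
  let total := nums.foldl (· + ·) 0
  let selected := (PySem.List.enumerate nums).foldl
    (fun acc p => if PySem.Int.band (shiftN bitmask p.1.toNat) 1 = 1 then acc + p.2 else acc) 0
  2 * selected - total

-- ===== PRECONDITION & SPEC =====
def Spec_calcSum (bitmask : Int) (nums : List Int) (out : Int) : Prop := out = calcSum_alt bitmask nums
instance (bitmask : Int) (nums : List Int) (out : Int) : Decidable (Spec_calcSum bitmask nums out) := by unfold Spec_calcSum; infer_instance

-- ===== CLAIM (what is proved, stated in full; the proofs are below) =====
def Claim_equal_calcSum : Prop := ∀ (bitmask : Int) (nums : List Int), Dom_calcSum bitmask nums → Spec_calcSum bitmask nums (calcSum bitmask nums)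

-- ===== LEMMAS AND PROOFS =====

-- structural "sum of elements whose current low bit is set"
def sel : Int → List Int → Int
  | _, [] => 0
  | b, x :: xs => (if PySem.Int.band b 1 = 1 then x else 0) + sel (shiftN b 1) xs

theorem shiftR_succ (b : Int) (k : Nat) : shiftN b (k + 1) = shiftN (shiftN b k) 1 :=
  Int.shiftRight_add b k 1

theorem sel_shift (b : Int) (xs : List Int) (k : Nat) (acc : Int) :
    (PySem.List.enumerate xs (k : Int)).foldl
      (fun acc p => if PySem.Int.band (shiftN b p.1.toNat) 1 = 1 then acc + p.2 else acc) acc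
    = acc + sel (shiftN b k) xs := by
  induction xs generalizing k acc with
  | nil => simp [PySem.List.enumerate, sel]
  | cons x xs ih =>
    rw [PySem.List.enumerate_cons]
    simp only [List.foldl_cons, Int.toNat_natCast]
    have : ((k : Int) + 1) = ((k + 1 : Nat) : Int) := by push_cast; ring
    rw [this, ih, sel, shiftR_succ]
    by_cases h : PySem.Int.band (shiftN b k) 1 = 1 <;> simp [h] <;> ring

theorem loopA (b s : Int) (xs : List Int) :
    (xs.foldl (fun (st : Int × Int) x => (st.1 + getSign st.2 * x, shiftN st.2 1)) (s, b)).1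
    = s + 2 * sel b xs - xs.foldl (· + ·) 0 := by
  have hsum : ∀ (a : Int) (ys : List Int), ys.foldl (· + ·) a = a + ys.foldl (· + ·) 0 := by
    intro a ys
    induction ys generalizing a with
    | nil => simp
    | cons y ys ihy => simp only [List.foldl_cons]; rw [ihy, ihy (0 + y)]; ring
  induction xs generalizing b s with
  | nil => simp [sel]
  | cons x xs ih =>
    simp only [List.foldl_cons]
    rw [ih, sel, hsum (0 + x)]
    unfold getSign
    split <;> ring

-- ===== VERDICT (by name: the statement is the Claim_ definition above) =====
theorem calcSum_spec : Claim_equal_calcSum := by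
  intro bitmask nums _
  show calcSum bitmask nums = calcSum_alt bitmask nums
  unfold calcSum calcSum_alt
  have h := sel_shift bitmask nums 0 0
  simp only [Nat.cast_zero] at h
  rw [loopA, h]
  simp [shiftN]
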